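-- pv_equiv track=rewrite | github.com/gabriellaec/desoft-analise-exercicios | backup/user_055/ch82_2020_04_13_00_54_34_453311.py | primeiras_ocorrencias
-- ===== SOURCE A (Python) =====
-- def primeiras_ocorrencias(palavra):
--     contagem = {}
--     x = 0
--     for letra in palavra:
--         if letra not in contagem:
--             contagem[letra] = x
--         x += 1
--     return contagem
-- ===== SOURCE B (Python) =====
-- def primeiras_ocorrencias(palavra):
--     # dict comprehension: each char maps to its first-occurrence index;
--     # duplicate keys overwrite with the same value, keys keep first-appearance order
--     return {c: palavra.index(c) for c in palavra}
-- ===== Notes on version B (the rewrite author's own statement) =====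
-- stated objective: idiomatic
-- what changed: Replaces the manual counter loop with membership tests by a one-line dict comprehension that computes each character's first index with str.index.
import Mathlib
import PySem

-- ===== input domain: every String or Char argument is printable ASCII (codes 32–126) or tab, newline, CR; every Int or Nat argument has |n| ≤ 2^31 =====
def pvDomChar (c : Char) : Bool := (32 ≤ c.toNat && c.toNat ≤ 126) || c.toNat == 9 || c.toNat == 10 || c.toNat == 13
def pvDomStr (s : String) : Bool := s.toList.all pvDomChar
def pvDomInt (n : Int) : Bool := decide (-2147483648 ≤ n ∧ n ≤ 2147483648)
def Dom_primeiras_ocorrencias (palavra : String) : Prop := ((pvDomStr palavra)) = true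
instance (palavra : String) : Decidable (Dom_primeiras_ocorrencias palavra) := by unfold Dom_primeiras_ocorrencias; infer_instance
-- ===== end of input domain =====

-- B replaces A's counter loop with a dict comprehension keyed on str.index (idiomatic, not faster).

-- ===== PORT A =====
-- counter loop: insert letra ↦ x only when letra is not yet a key; x counts every char
def primeiras_ocorrencias (palavra : String) : List (String × Int) :=
  ((palavra.toList.foldl
      (fun (st : PySem.Dict String Int × Int) letra =>
        ( if st.1.contains (String.mk [letra]) then st.1
          else st.1.insert (String.mk [letra]) st.2,
          st.2 + 1))
      (PySem.Dict.empty, 0)).1).items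

-- ===== PORT B =====
-- dict comprehension {c: palavra.index(c) for c in palavra}; palavra.index(c) is the first
-- occurrence of the char c, ported as PySem.List.index? on the char list (c ∈ palavra always,
-- so index? is never none and the .getD 0 default is unreachable — exact on every input)
def primeiras_ocorrencias_alt (palavra : String) : List (String × Int) :=
  (palavra.toList.foldl
      (fun (d : PySem.Dict String Int) c =>
        d.insert (String.mk [c]) (((PySem.List.index? palavra.toList c).getD 0 : Nat) : Int))
      PySem.Dict.empty).items

-- ===== PRECONDITION & SPEC =====
def Spec_primeiras_ocorrencias (palavra : String) (out : List (String × Int)) : Prop := out = primeiras_ocorrencias_alt palavra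
instance (palavra : String) (out : List (String × Int)) : Decidable (Spec_primeiras_ocorrencias palavra out) := by unfold Spec_primeiras_ocorrencias; infer_instance

-- ===== CLAIM (what is proved, stated in full; the proofs are below) =====
def Claim_equal_primeiras_ocorrencias : Prop := ∀ (palavra : String), Dom_primeiras_ocorrencias palavra → Spec_primeiras_ocorrencias palavra (primeiras_ocorrencias palavra)

-- ===== LEMMAS AND PROOFS =====

theorem toList_mk_single (x : Char) : (String.mk [x]).toList = [x] :=
  Eq.symm (String.ofList_eq.mp rfl)

theorem mk_single_inj {x y : Char} (h : String.mk [x] = String.mk [y]) : x = y := by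
  have h2 := congrArg String.toList h
  rw [toList_mk_single, toList_mk_single] at h2
  simpa using h2

-- inserting a key with the value it already has leaves the dict unchanged
theorem insert_same (d : PySem.Dict String Int) (k : String) (v : Int)
    (hnd : d.keys.Nodup) (h : d.get? k = some v) : d.insert k v = d := by
  have hc : d.contains k = true := by
    rw [PySem.Dict.contains_eq_isSome_get?, h]; rfl
  apply PySem.Dict.ext
  rw [PySem.Dict.items_insert]
  simp only [hc, if_true]
  have : ∀ p ∈ d.items, (if p.1 == k then (k, v) else p) = p := by
    intro p hp
    obtain ⟨p1, p2⟩ := p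
    by_cases hk : p1 = k
    · subst hk
      have h2 : d.get? p1 = some p2 := PySem.Dict.get?_of_mem_items d hp hnd
      rw [h] at h2
      simp only [Option.some.injEq] at h2
      simp [h2]
    · simp [hk]
  rw [List.map_congr_left this, List.map_id']

theorem main_loop (L : List Char) :
    ∀ (l p : List Char) (d : PySem.Dict String Int),
      L = p ++ l →
      d.keys.Nodup →
      (∀ c : Char, d.contains (String.mk [c]) = decide (c ∈ p)) →
      (∀ c ∈ p, d.get? (String.mk [c]) = some (((PySem.List.index? L c).getD 0 : Nat) : Int)) →
      (l.foldl
          (fun (st : PySem.Dict String Int × Int) letra =>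
            ( if st.1.contains (String.mk [letra]) then st.1
              else st.1.insert (String.mk [letra]) st.2,
              st.2 + 1))
          (d, (p.length : Int))).1
        = l.foldl
            (fun (d : PySem.Dict String Int) c =>
              d.insert (String.mk [c]) (((PySem.List.index? L c).getD 0 : Nat) : Int))
            d := by
  intro l
  induction l with
  | nil => intro p d _ _ _ _; rfl
  | cons c rest ih =>
    intro p d hL hnd hcont hget
    simp only [List.foldl_cons]
    by_cases hc : c ∈ p
    · have h1 : d.contains (String.mk [c]) = true := by rw [hcont]; simpa
      have h2 : d.insert (String.mk [c]) (((PySem.List.index? L c).getD 0 : Nat) : Int) = d :=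
        insert_same _ _ _ hnd (hget c hc)
      rw [h1, h2]
      simp only [if_true]
      have := ih (p ++ [c]) d (by simpa using hL) hnd
        (by intro x
            rw [hcont x]
            by_cases hx : x = c
            · rw [hx]; simp [hc]
            · simp [hx])
        (by intro x hx
            rcases List.mem_append.mp hx with hx | hx
            · exact hget x hx
            · have hxc : x = c := by simpa using hx
              rw [hxc]; exact hget c hc)
      simpa [List.length_append] using this
    · have h1 : d.contains (String.mk [c]) = false := by rw [hcont]; simpa
      have hidx : PySem.List.index? L c = some p.length := by
        rw [PySem.List.index?_eq_some_iff]
        exact ⟨p, rest, hL, rfl, hc⟩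
      have hval : (((PySem.List.index? L c).getD 0 : Nat) : Int) = (p.length : Int) := by
        rw [hidx]; rfl
      rw [h1, hval]
      simp only [if_false, Bool.false_eq_true]
      set d' := d.insert (String.mk [c]) (p.length : Int) with hd'
      have := ih (p ++ [c]) d' (by simpa using hL)
        (PySem.Dict.nodup_keys_insert _ _ _ hnd)
        (by intro x
            rw [hd', PySem.Dict.contains_insert, hcont x]
            by_cases hx : x = c
            · subst hx; simp
            · have : (String.mk [x] == String.mk [c]) = false := by
                simp only [beq_eq_false_iff_ne, ne_eq]
                intro h; exact hx (mk_single_inj h)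
              simp [this, hx])
        (by intro x hx
            rcases List.mem_append.mp hx with hx | hx
            · have hxc : x ≠ c := fun he => hc (he ▸ hx)
              have hne : String.mk [x] ≠ String.mk [c] := fun h => hxc (mk_single_inj h)
              rw [hd', PySem.Dict.get?_insert_of_ne _ _ hne]
              exact hget x hx
            · simp at hx; subst hx
              rw [hd', PySem.Dict.get?_insert_self, hval])
      simpa [List.length_append] using this

-- ===== VERDICT (by name: the statement is the Claim_ definition above) =====
theorem primeiras_ocorrencias_spec : Claim_equal_primeiras_ocorrencias := by
  intro palavra _
  unfold Spec_primeiras_ocorrencias primeiras_ocorrencias primeiras_ocorrencias_alt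
  congr 1
  have := main_loop palavra.toList palavra.toList [] PySem.Dict.empty rfl
    PySem.Dict.nodup_keys_empty (by intro c; simp [PySem.Dict.contains_empty])
    (by intro c hc; simp at hc)
  simpa using this
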